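-- pv_equiv track=rewrite | github.com/chl218/Bioinformatics | 00-Finding-Hidden-Messages-in-DNA/01-Where-in-the-Genome-Does-Replication-Begin/dnaa.py | FindAllKmers
-- ===== SOURCE A (Python) =====
-- def PatternCount(Text, Pattern):
--
--     textLen    = len(Text)
--     patternLen = len(Pattern)
--
--     count = 0
--     for i in range(0, textLen - patternLen + 1):
--         if Text[i:i+patternLen] == Pattern:
--             count += 1
--
--     return count
--
-- def FindAllKmers(genome, k):
--     textLen = len(genome)
--
--     frequentPatterns = set()
--     count = [0] * textLen
--
--     # Search for k-mer patterns
--     for i in range(0, textLen - k + 1):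
--         pattern = genome[i:i+k]
--         count[i] = PatternCount(genome, pattern)
--     # Search for most frequent k-mers
--     for i in range(0, textLen - k + 1):
--         if count[i] > 1:
--             frequentPatterns.add(genome[i:i+k])
--
--     return frequentPatterns
-- ===== SOURCE B (Python) =====
-- def FindAllKmers(genome, k):
--     counts = {}
--     for i in range(len(genome) - k + 1):
--         kmer = genome[i:i+k]
--         counts[kmer] = counts.get(kmer, 0) + 1
--     return {kmer for kmer, c in counts.items() if c > 1}
-- ===== Notes on version B (the rewrite author's own statement) =====
-- stated objective: faster
-- what changed: A calls PatternCount (a full-genome scan) for every position, giving nested scans; B makes one pass that tallies every k-mer in a dict and then keeps the keys seen more than once.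
import Mathlib
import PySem

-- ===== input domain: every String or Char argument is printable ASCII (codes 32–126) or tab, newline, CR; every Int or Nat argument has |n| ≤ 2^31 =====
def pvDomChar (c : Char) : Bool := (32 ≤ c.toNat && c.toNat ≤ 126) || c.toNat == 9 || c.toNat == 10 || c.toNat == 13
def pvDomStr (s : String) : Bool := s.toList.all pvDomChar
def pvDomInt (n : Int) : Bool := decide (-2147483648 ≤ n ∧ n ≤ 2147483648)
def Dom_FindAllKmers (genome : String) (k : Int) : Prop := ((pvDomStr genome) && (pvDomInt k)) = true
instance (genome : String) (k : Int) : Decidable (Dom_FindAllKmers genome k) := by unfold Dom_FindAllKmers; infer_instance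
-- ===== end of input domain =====

-- B replaces A's per-position full-genome PatternCount scans with a single tallying
-- pass over the k-mers (objective: faster).

-- ===== PORT A =====
def PatternCount (Text : String) (Pattern : String) : Int :=
  let textLen := PySem.Str.len Text
  let patternLen := PySem.Str.len Pattern
  (PySem.List.pyRange 0 (textLen - patternLen + 1) 1).foldl
    (fun count i =>
      if PySem.Str.slice Text (some i) (some (i + patternLen)) == Pattern then count + 1 else count)
    0

def FindAllKmers (genome : String) (k : Int) : List String :=
  let textLen := PySem.Str.len genome
  let count0 : List Int := List.replicate textLen.toNat 0
  -- Search for k-mer patterns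
  let count := (PySem.List.pyRange 0 (textLen - k + 1) 1).foldl
    (fun cnt i =>
      PySem.List.pySetD cnt i
        (PatternCount genome (PySem.Str.slice genome (some i) (some (i + k))))) count0
  -- Search for most frequent k-mers
  (PySem.List.pyRange 0 (textLen - k + 1) 1).foldl
    (fun s i =>
      if PySem.List.pyGetD count i 0 > 1 then
        PySem.Set.add s (PySem.Str.slice genome (some i) (some (i + k)))
      else s)
    PySem.Set.empty

-- ===== PORT B =====
def FindAllKmers_alt (genome : String) (k : Int) : List String :=
  let counts : PySem.Dict String Int :=
    (PySem.List.pyRange 0 (PySem.Str.len genome - k + 1) 1).foldl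
      (fun d i =>
        -- counts[kmer] = counts.get(kmer, 0) + 1
        d.modify (PySem.Str.slice genome (some i) (some (i + k))) 0 (· + 1))
      PySem.Dict.empty
  -- {kmer for kmer, c in counts.items() if c > 1}
  PySem.Set.ofList ((counts.items.filter (fun p => p.2 > 1)).map Prod.fst)

-- ===== PRECONDITION & SPEC =====
-- A writes count[i] for every i in range(len(genome) - k + 1); for k ≤ 0 this index
-- reaches len(genome) and A raises IndexError, so Pre_ requires k ≥ 1.
def Pre_FindAllKmers (genome : String) (k : Int) : Prop := 1 ≤ k
instance (genome : String) (k : Int) : Decidable (Pre_FindAllKmers genome k) := by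
  unfold Pre_FindAllKmers; infer_instance

def pvWitness_FindAllKmers : String × Int := ("ACAACA", 3)

def Spec_FindAllKmers (genome : String) (k : Int) (out : List String) : Prop := out = FindAllKmers_alt genome k
instance (genome : String) (k : Int) (out : List String) : Decidable (Spec_FindAllKmers genome k out) := by unfold Spec_FindAllKmers; infer_instance

-- ===== CLAIM (what is proved, stated in full; the proofs are below) =====
def Claim_equal_FindAllKmers : Prop := ∀ (genome : String) (k : Int), Dom_FindAllKmers genome k → Pre_FindAllKmers genome k → Spec_FindAllKmers genome k (FindAllKmers genome k)

-- ===== LEMMAS AND PROOFS =====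

-- the list of all k-mers of the genome, in order of position (proof-side view)
def pvKmers (genome : String) (k : Int) : List String :=
  (PySem.List.pyRange 0 (PySem.Str.len genome - k + 1) 1).map
    (fun i => PySem.Str.slice genome (some i) (some (i + k)))

lemma pv_len_slice (s : String) (i k : Int) (hi : 0 ≤ i) (hk : 0 ≤ k)
    (hik : i + k ≤ (s.toList.length : Int)) :
    PySem.Str.len (PySem.Str.slice s (some i) (some (i + k))) = k := by
  have hik' : i + k ≤ (s.length : Int) := by simpa using hik
  simp only [PySem.Str.len, PySem.Str.slice]
  rw [String.toList_ofList]
  show ((PySem.List.slice s.toList (some i) (some (i + k))).length : Int) = k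
  rw [PySem.List.length_slice]
  simp only [PySem.List.clampIdx]
  split_ifs <;> simp_all <;> omega

lemma pv_setlen (g : Int → Int) (l : List Int) (c0 : List Int) :
    (l.foldl (fun c j => PySem.List.pySetD c j (g j)) c0).length = c0.length := by
  induction l generalizing c0 with
  | nil => rfl
  | cons x xs ih => simp [List.foldl_cons, ih, PySem.List.length_pySetD]

lemma pv_setget (g : Int → Int) :
    ∀ (m : ℕ) (c0 : List Int), m ≤ c0.length → ∀ i : ℕ, i < m →
      PySem.List.pyGetD
        ((PySem.List.pyRange 0 (m : Int) 1).foldl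
          (fun c j => PySem.List.pySetD c j (g j)) c0) (i : Int) 0 = g i := by
  intro m
  induction m with
  | zero => intro c0 _ i hi; omega
  | succ m ih =>
    intro c0 hlen i hi
    have hcast : ((m + 1 : ℕ) : Int) = (m : Int) + 1 := by push_cast; ring
    rw [hcast, PySem.List.pyRange_one_succ_right (by positivity), List.foldl_append]
    simp only [List.foldl_cons, List.foldl_nil]
    rw [PySem.List.pyGetD_pySetD_natCast _ m i _ _ (by rw [pv_setlen]; omega)]
    by_cases h : i = m
    · simp [h]
    · simp only [if_neg h]
      exact ih c0 (by omega) i (by omega)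

lemma pv_patternCount (genome : String) (k : Int) (pattern : String)
    (hlen : PySem.Str.len pattern = k) :
    PatternCount genome pattern = ((pvKmers genome k).count pattern : Int) := by
  unfold PatternCount pvKmers
  simp only []
  rw [hlen]
  rw [← List.foldl_map (f := fun i => PySem.Str.slice genome (some i) (some (i + k)))
      (g := fun count x => if x == pattern then count + 1 else count)]
  rw [PySem.List.foldl_beq_add_one]
  simp

lemma pv_ofList_filter {α : Type} [BEq α] [LawfulBEq α] (p : α → Bool) (xs : List α) :
    PySem.Set.ofList (xs.filter p) = (PySem.Set.ofList xs).filter p := by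
  induction xs using List.reverseRecOn with
  | nil => rfl
  | append_singleton xs x ih =>
    rw [List.filter_append, PySem.Set.ofList_append_singleton, PySem.Set.add_eq_ite]
    by_cases hp : p x
    · have hfx : List.filter p [x] = [x] := by simp [hp]
      rw [hfx, PySem.Set.ofList_append_singleton, PySem.Set.add_eq_ite, ih]
      by_cases hm : x ∈ PySem.Set.ofList xs
      · rw [if_pos hm, if_pos (by simp [List.mem_filter, hm, hp])]
      · rw [if_neg hm, if_neg (by simp [List.mem_filter, hm]), List.filter_append, hfx]
    · have hp' : p x = false := by simpa using hp
      have hfx : List.filter p [x] = [] := by simp [hp']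
      rw [hfx, List.append_nil, ih]
      by_cases hm : x ∈ PySem.Set.ofList xs
      · rw [if_pos hm]
      · rw [if_neg hm, List.filter_append, hfx, List.append_nil]

-- A's value in closed form: the set of k-mers occurring more than once, in genome order
lemma pv_A_eq (genome : String) (k : Int) (hpre : 1 ≤ k) :
    FindAllKmers genome k =
      PySem.Set.ofList ((pvKmers genome k).filter
        (fun x => decide ((1 : Int) < ((pvKmers genome k).count x : Int)))) := by
  unfold FindAllKmers
  simp only []
  by_cases hm0 : PySem.Str.len genome - k + 1 ≤ 0
  · rw [PySem.List.pyRange_one_eq_nil hm0]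
    unfold pvKmers
    rw [PySem.List.pyRange_one_eq_nil hm0]
    rfl
  · rw [not_le] at hm0
    have hNlen : PySem.Str.len genome = (genome.toList.length : Int) := by
      simp [PySem.Str.len]
    set M := (PySem.Str.len genome - k + 1).toNat with hM
    have hMc : ((M : Int)) = PySem.Str.len genome - k + 1 := by
      rw [hM]; exact Int.toNat_of_nonneg (le_of_lt hm0)
    rw [← hMc]
    have hkm : (PySem.List.pyRange 0 (M : Int) 1).map
        (fun i => PySem.Str.slice genome (some i) (some (i + k))) = pvKmers genome k := by
      unfold pvKmers; rw [hMc]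
    have hget : ∀ i ∈ PySem.List.pyRange 0 (M : Int) 1,
        PySem.List.pyGetD
          ((PySem.List.pyRange 0 (M : Int) 1).foldl
            (fun c j => PySem.List.pySetD c j
              (PatternCount genome (PySem.Str.slice genome (some j) (some (j + k)))))
            (List.replicate (PySem.Str.len genome).toNat 0)) i 0
          = PatternCount genome (PySem.Str.slice genome (some i) (some (i + k))) := by
      intro i hi
      obtain ⟨hi0, hilt⟩ := (PySem.List.mem_pyRange_one).1 hi
      have hMle : M ≤ (List.replicate (PySem.Str.len genome).toNat (0 : Int)).length := by
        rw [List.length_replicate, hM]; omega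
      have hi' : i = ((i.toNat : ℕ) : Int) := by omega
      rw [hi']
      exact pv_setget _ M _ hMle i.toNat (by omega)
    rw [PySem.List.foldl_congr_mem _ _
      (fun acc i => if (1 : Int) <
          ((pvKmers genome k).count (PySem.Str.slice genome (some i) (some (i + k))) : Int)
        then PySem.Set.add acc (PySem.Str.slice genome (some i) (some (i + k))) else acc) _
      (by
        intro acc i hi
        obtain ⟨hi0, hilt⟩ := (PySem.List.mem_pyRange_one).1 hi
        rw [hMc] at hilt
        have hik : i + k ≤ (genome.toList.length : Int) := by omega
        rw [hget i hi, pv_patternCount genome k _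
          (pv_len_slice genome i k hi0 (by omega) hik)])]
    rw [← List.foldl_map (f := fun i => PySem.Str.slice genome (some i) (some (i + k)))
      (g := fun acc x => if (1 : Int) < ((pvKmers genome k).count x : Int)
        then PySem.Set.add acc x else acc)]
    rw [hkm]
    rw [PySem.List.foldl_ite_eq_foldl_filter
      (p := fun x => (1 : Int) < ((pvKmers genome k).count x : Int)) (f := PySem.Set.add)]
    rw [show (PySem.Set.empty : PySem.Set String) = ([] : List String) from rfl,
      ← PySem.Set.ofList_eq_foldl]

-- B's value in closed form: the same set
lemma pv_B_eq (genome : String) (k : Int) :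
    FindAllKmers_alt genome k =
      PySem.Set.ofList ((PySem.Set.ofList (pvKmers genome k)).filter
        (fun x => decide ((1 : Int) < ((pvKmers genome k).count x : Int)))) := by
  unfold FindAllKmers_alt
  simp only []
  rw [← List.foldl_map (f := fun i => PySem.Str.slice genome (some i) (some (i + k)))
      (g := fun (d : PySem.Dict String Int) x => d.modify x 0 (· + 1))]
  rw [show (PySem.List.pyRange 0 (PySem.Str.len genome - k + 1) 1).map
        (fun i => PySem.Str.slice genome (some i) (some (i + k))) = pvKmers genome k from rfl]
  rw [← PySem.Dict.counter_eq_foldl, PySem.Dict.items_counter]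
  rw [List.filter_map]
  rw [List.map_map]
  congr 1
  · simp [Function.comp_def]


-- ===== VERDICT (by name: the statement is the Claim_ definition above) =====
theorem FindAllKmers_spec : Claim_equal_FindAllKmers := by
  intro genome k _ hpre
  unfold Spec_FindAllKmers
  rw [pv_A_eq genome k hpre, pv_B_eq genome k, pv_ofList_filter,
    PySem.Set.ofList_eq_self_of_nodup _ ((PySem.Set.nodup_ofList _).filter _)]
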